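-- pv_equiv track=rewrite | github.com/teamWSIZ/AI2022 | sequence_prediction/transformer/corpus_generators.py | use_caps
-- ===== SOURCE A (Python) =====
-- def use_caps(w: list[int]) -> list[int]:
--     is_caps = False
--     res = []
--     for c in w:
--         if c == 5:
--             res.append(6 if is_caps else 5)
--             is_caps = not is_caps
--         else:
--             res.append(c + 10 if is_caps else c)
--     return res
-- ===== SOURCE B (Python) =====
-- def use_caps(w: list[int]) -> list[int]:
--     # Pass 1: caps flag per index = parity of number of 5s strictly before it.
--     flags = []
--     fives = 0
--     for c in w:
--         flags.append(fives % 2 == 1)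
--         if c == 5:
--             fives += 1
--     # Pass 2: state-free emission from (element, flag) pairs.
--     return [(6 if f else 5) if c == 5 else (c + 10 if f else c)
--             for c, f in zip(w, flags)]
-- ===== Notes on version B (the rewrite author's own statement) =====
-- stated objective: alternative
-- what changed: Replaces the running mutable caps toggle with a precomputed per-index parity table (count of 5s strictly before each index) followed by a stateless zip pass.
import Mathlib
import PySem

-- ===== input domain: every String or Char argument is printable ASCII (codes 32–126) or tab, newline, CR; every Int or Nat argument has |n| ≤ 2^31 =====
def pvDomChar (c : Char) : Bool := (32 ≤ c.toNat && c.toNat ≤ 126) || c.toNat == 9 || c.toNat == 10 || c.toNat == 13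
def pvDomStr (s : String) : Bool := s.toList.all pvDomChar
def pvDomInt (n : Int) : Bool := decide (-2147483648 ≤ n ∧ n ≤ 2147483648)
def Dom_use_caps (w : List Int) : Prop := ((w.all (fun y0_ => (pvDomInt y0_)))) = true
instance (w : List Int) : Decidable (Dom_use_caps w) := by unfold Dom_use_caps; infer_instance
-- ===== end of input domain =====

-- B replaces A's running mutable caps toggle by a precomputed per-index parity table plus a stateless zip pass (alternative decomposition, same cost).


-- ===== PORT A =====
-- literal transliteration: one loop carrying (is_caps, res); aStep is the loop body
def aStep (st : Bool × List Int) (c : Int) : Bool × List Int :=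
  if c == 5 then (!st.1, st.2 ++ [if st.1 then 6 else 5])
  else (st.1, st.2 ++ [if st.1 then c + 10 else c])

def use_caps (w : List Int) : List Int :=
  (w.foldl aStep (false, [])).2

-- ===== PORT B =====
-- pass 1: loop carrying (fives, flags) (fStep is its body); pass 2: stateless map over zip
def fStep (st : Int × List Bool) (c : Int) : Int × List Bool :=
  let fl := st.2 ++ [st.1 % 2 == 1]
  if c == 5 then (st.1 + 1, fl) else (st.1, fl)

def bEmit (p : Int × Bool) : Int :=
  if p.1 == 5 then (if p.2 then 6 else 5)
  else (if p.2 then p.1 + 10 else p.1)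

def use_caps_alt (w : List Int) : List Int :=
  let flags := (w.foldl fStep (0, [])).2
  (w.zip flags).map bEmit

-- ===== PRECONDITION & SPEC =====
def Spec_use_caps (w : List Int) (out : List Int) : Prop := out = use_caps_alt w
instance (w : List Int) (out : List Int) : Decidable (Spec_use_caps w out) := by unfold Spec_use_caps; infer_instance

-- ===== CLAIM (what is proved, stated in full; the proofs are below) =====
def Claim_equal_use_caps : Prop := ∀ (w : List Int), Dom_use_caps w → Spec_use_caps w (use_caps w)

-- ===== LEMMAS AND PROOFS =====

-- pure recursion describing A's loop from caps state b
def aRec : Bool → List Int → List Int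
  | _, [] => []
  | b, c :: cs =>
    if c = 5 then (if b then (6 : Int) else 5) :: aRec (!b) cs
    else (if b then c + 10 else c) :: aRec b cs

-- pure recursion describing B's flag list from current parity b
def fRec : Bool → List Int → List Bool
  | _, [] => []
  | b, c :: cs => b :: fRec (if c = 5 then !b else b) cs

theorem use_caps_fold_eq (w : List Int) : ∀ (b : Bool) (res : List Int),
    (w.foldl aStep (b, res)).2 = res ++ aRec b w := by
  induction w with
  | nil => intro b res; simp [aRec]
  | cons c cs ih =>
    intro b res
    rw [List.foldl_cons]
    by_cases h : c = 5
    · have hs : aStep (b, res) c = (!b, res ++ [if b then 6 else 5]) := by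
        simp [aStep, h]
      rw [hs, ih]; simp [aRec, h]
    · have hs : aStep (b, res) c = (b, res ++ [if b then c + 10 else c]) := by
        simp [aStep, h]
      rw [hs, ih]; simp [aRec, h]

theorem flags_fold_eq (w : List Int) : ∀ (n : Int) (fls : List Bool),
    (w.foldl fStep (n, fls)).2 = fls ++ fRec (n % 2 == 1) w := by
  induction w with
  | nil => intro n fls; simp [fRec]
  | cons c cs ih =>
    intro n fls
    have hpar : (((n + 1) % 2 == 1) : Bool) = !(n % 2 == 1) := by
      rcases Int.emod_two_eq_zero_or_one n with h | h <;> simp [h] <;> omega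
    rw [List.foldl_cons]
    by_cases h : c = 5
    · have hs : fStep (n, fls) c = (n + 1, fls ++ [n % 2 == 1]) := by
        simp [fStep, h]
      rw [hs, ih, hpar]; simp [fRec, h]
    · have hs : fStep (n, fls) c = (n, fls ++ [n % 2 == 1]) := by
        simp [fStep, h]
      rw [hs, ih]; simp [fRec, h]

theorem zip_fRec_eq (w : List Int) : ∀ (b : Bool),
    (w.zip (fRec b w)).map bEmit = aRec b w := by
  induction w with
  | nil => intro b; simp [fRec, aRec]
  | cons c cs ih =>
    intro b
    by_cases h : c = 5 <;> simp [fRec, aRec, bEmit, h, ih]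

-- ===== VERDICT (by name: the statement is the Claim_ definition above) =====
theorem use_caps_spec : Claim_equal_use_caps := by
  intro w _
  unfold Spec_use_caps use_caps use_caps_alt
  rw [use_caps_fold_eq w false [], flags_fold_eq w 0 []]
  simp [zip_fRec_eq]
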